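-- pv_equiv track=rewrite | github.com/iWrityDev/skriuwer-site | scripts/import_google_books.py | map_categories
-- ===== SOURCE A (Python) =====
-- CATEGORY_MAP = {
--     "history": "history",
--     "ancient": "history",
--     "medieval": "history",
--     "military": "history",
--     "war": "history",
--     "mythology": "mythology",
--     "myth": "mythology",
--     "legend": "mythology",
--     "religion": "religion",
--     "spiritual": "religion",
--     "bible": "religion",
--     "christianity": "religion",
--     "islam": "religion",
--     "buddhism": "religion",
--     "language": "language-learning",
--     "foreign language": "language-learning",
--     "linguistics": "language-learning",
--     "self-help": "self-help",
--     "personal development": "self-help",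
--     "motivation": "self-help",
--     "productivity": "self-help",
--     "psychology": "psychology",
--     "mind": "psychology",
--     "cognitive": "psychology",
--     "mental health": "psychology",
--     "behavior": "psychology",
--     "behaviour": "psychology",
--     "business": "business",
--     "finance": "business",
--     "economics": "business",
--     "investing": "business",
--     "biography": "biography",
--     "memoir": "biography",
--     "autobiography": "biography",
--     "true crime": "true-crime",
--     "crime": "true-crime",
--     "fiction": "fiction",
--     "novel": "fiction",
--     "thriller": "fiction",
--     "fantasy": "fiction",
--     "science fiction": "fiction",
--     "science": "science",
--     "nature": "science",
--     "technology": "science",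
--     "philosophy": "philosophy",
--     "stoicism": "philosophy",
--     "ethics": "philosophy",
-- }
--
-- def map_categories(google_categories):
--     """Map Google Books categories to site categories."""
--     if not google_categories:
--         return ["history"]
--     combined = " ".join(google_categories).lower()
--     matched = []
--     seen = set()
--     for key, site_cat in CATEGORY_MAP.items():
--         if key in combined and site_cat not in seen:
--             matched.append(site_cat)
--             seen.add(site_cat)
--     return matched if matched else ["history"]
-- ===== SOURCE B (Python) =====
-- # Compact trigger table: site category -> "|"-separated trigger keywords,
-- # grouped once by hand in CATEGORY_MAP's first-appearance order.
-- SITE_CATEGORY_KEYS = [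
--     ("history", "history|ancient|medieval|military|war"),
--     ("mythology", "mythology|myth|legend"),
--     ("religion", "religion|spiritual|bible|christianity|islam|buddhism"),
--     ("language-learning", "language|foreign language|linguistics"),
--     ("self-help", "self-help|personal development|motivation|productivity"),
--     ("psychology", "psychology|mind|cognitive|mental health|behavior|behaviour"),
--     ("business", "business|finance|economics|investing"),
--     ("biography", "biography|memoir|autobiography"),
--     ("true-crime", "true crime|crime"),
--     ("fiction", "fiction|novel|thriller|fantasy|science fiction"),
--     ("science", "science|nature|technology"),
--     ("philosophy", "philosophy|stoicism|ethics"),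
-- ]
--
--
-- def map_categories(google_categories):
--     """Map Google Books categories to site categories."""
--     if not google_categories:
--         return ["history"]
--     combined = " ".join(google_categories).lower()
--     matched = [cat for cat, spec in SITE_CATEGORY_KEYS
--                if any(k in combined for k in spec.split("|"))]
--     return matched or ["history"]
-- ===== Notes on version B (the rewrite author's own statement) =====
-- stated objective: alternative
-- what changed: B replaces the flat key->category map and per-iteration seen-set with a hand-grouped compact table (site category -> '|'-separated trigger keywords) scanned once with any(), so deduplication disappears entirely.
import Mathlib
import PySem

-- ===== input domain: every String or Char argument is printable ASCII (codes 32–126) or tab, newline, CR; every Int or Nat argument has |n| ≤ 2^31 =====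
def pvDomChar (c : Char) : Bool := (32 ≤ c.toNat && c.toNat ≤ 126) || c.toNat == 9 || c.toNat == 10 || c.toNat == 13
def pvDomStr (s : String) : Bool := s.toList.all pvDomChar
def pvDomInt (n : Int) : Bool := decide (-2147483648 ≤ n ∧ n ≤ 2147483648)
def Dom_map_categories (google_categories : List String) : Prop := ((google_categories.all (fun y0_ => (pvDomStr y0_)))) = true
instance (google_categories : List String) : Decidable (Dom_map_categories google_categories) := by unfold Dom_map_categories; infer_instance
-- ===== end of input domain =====

-- B regroups the flat key->category map into a compact table site-category -> '|'-separated
-- trigger keywords, scanned once with any(); A's seen-set deduplication disappears (objective: alternative).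

-- ===== PORT A =====
def CATEGORY_MAP : List (String × String) := [
  ("history", "history"), ("ancient", "history"), ("medieval", "history"),
  ("military", "history"), ("war", "history"),
  ("mythology", "mythology"), ("myth", "mythology"), ("legend", "mythology"),
  ("religion", "religion"), ("spiritual", "religion"), ("bible", "religion"),
  ("christianity", "religion"), ("islam", "religion"), ("buddhism", "religion"),
  ("language", "language-learning"), ("foreign language", "language-learning"),
  ("linguistics", "language-learning"),
  ("self-help", "self-help"), ("personal development", "self-help"),
  ("motivation", "self-help"), ("productivity", "self-help"),
  ("psychology", "psychology"), ("mind", "psychology"), ("cognitive", "psychology"),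
  ("mental health", "psychology"), ("behavior", "psychology"), ("behaviour", "psychology"),
  ("business", "business"), ("finance", "business"), ("economics", "business"),
  ("investing", "business"),
  ("biography", "biography"), ("memoir", "biography"), ("autobiography", "biography"),
  ("true crime", "true-crime"), ("crime", "true-crime"),
  ("fiction", "fiction"), ("novel", "fiction"), ("thriller", "fiction"),
  ("fantasy", "fiction"), ("science fiction", "fiction"),
  ("science", "science"), ("nature", "science"), ("technology", "science"),
  ("philosophy", "philosophy"), ("stoicism", "philosophy"), ("ethics", "philosophy")]

def map_categories (google_categories : List String) : List String :=
  if google_categories = [] then ["history"]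
  else
    let combined := PySem.Str.lower (PySem.Str.join " " google_categories)
    let res := CATEGORY_MAP.foldl
      (fun (st : List String × PySem.Set String) kv =>
        if PySem.Str.isIn kv.1 combined && !(PySem.Set.contains st.2 kv.2)
        then (st.1 ++ [kv.2], PySem.Set.add st.2 kv.2)
        else st)
      ([], PySem.Set.empty)
    if res.1 = [] then ["history"] else res.1

-- ===== PORT B =====
def SITE_CATEGORY_KEYS : List (String × String) := [
  ("history", "history|ancient|medieval|military|war"),
  ("mythology", "mythology|myth|legend"),
  ("religion", "religion|spiritual|bible|christianity|islam|buddhism"),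
  ("language-learning", "language|foreign language|linguistics"),
  ("self-help", "self-help|personal development|motivation|productivity"),
  ("psychology", "psychology|mind|cognitive|mental health|behavior|behaviour"),
  ("business", "business|finance|economics|investing"),
  ("biography", "biography|memoir|autobiography"),
  ("true-crime", "true crime|crime"),
  ("fiction", "fiction|novel|thriller|fantasy|science fiction"),
  ("science", "science|nature|technology"),
  ("philosophy", "philosophy|stoicism|ethics")]

def map_categories_alt (google_categories : List String) : List String :=
  if google_categories = [] then ["history"]
  else
    let combined := PySem.Str.lower (PySem.Str.join " " google_categories)
    let matched := SITE_CATEGORY_KEYS.filterMap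
      (fun b => if ((PySem.Str.split? b.2 "|").getD []).any
                    (fun k => PySem.Str.isIn k combined)
                then some b.1 else none)
    if matched = [] then ["history"] else matched

-- ===== PRECONDITION & SPEC =====
def Spec_map_categories (google_categories : List String) (out : List String) : Prop := out = map_categories_alt google_categories
instance (google_categories : List String) (out : List String) : Decidable (Spec_map_categories google_categories out) := by unfold Spec_map_categories; infer_instance

-- ===== CLAIM (what is proved, stated in full; the proofs are below) =====
def Claim_equal_map_categories : Prop := ∀ (google_categories : List String), Dom_map_categories google_categories → Spec_map_categories google_categories (map_categories google_categories)

-- ===== LEMMAS AND PROOFS =====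

-- A's fold step, abstracted over the substring predicate p
def stepA (p : String → Bool) (st : List String × PySem.Set String) (kv : String × String) :
    List String × PySem.Set String :=
  if p kv.1 && !(PySem.Set.contains st.2 kv.2)
  then (st.1 ++ [kv.2], PySem.Set.add st.2 kv.2)
  else st

-- B's table with each spec already split into its trigger keys
def BLOCKS : List (String × List String) := [
  ("history", ["history", "ancient", "medieval", "military", "war"]),
  ("mythology", ["mythology", "myth", "legend"]),
  ("religion", ["religion", "spiritual", "bible", "christianity", "islam", "buddhism"]),
  ("language-learning", ["language", "foreign language", "linguistics"]),
  ("self-help", ["self-help", "personal development", "motivation", "productivity"]),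
  ("psychology", ["psychology", "mind", "cognitive", "mental health", "behavior", "behaviour"]),
  ("business", ["business", "finance", "economics", "investing"]),
  ("biography", ["biography", "memoir", "autobiography"]),
  ("true-crime", ["true crime", "crime"]),
  ("fiction", ["fiction", "novel", "thriller", "fantasy", "science fiction"]),
  ("science", ["science", "nature", "technology"]),
  ("philosophy", ["philosophy", "stoicism", "ethics"])]

set_option maxRecDepth 100000 in
theorem split_SITE_CATEGORY_KEYS :
    SITE_CATEGORY_KEYS.map (fun b => (b.1, (PySem.Str.split? b.2 "|").getD [])) = BLOCKS := by
  decide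

set_option maxRecDepth 100000 in
theorem map_flatMap : CATEGORY_MAP = BLOCKS.flatMap (fun b => b.2.map (fun k => (k, b.1))) := by
  decide

theorem block_seen (p : String → Bool) (m : List String) (s : PySem.Set String) (c : String)
    (ks : List String) (h : c ∈ s) :
    List.foldl (stepA p) (m, s) (ks.map (fun k => (k, c))) = (m, s) := by
  induction ks with
  | nil => rfl
  | cons k ks ih => simp [stepA, h, ih]

theorem block_new (p : String → Bool) (m : List String) (s : PySem.Set String) (c : String)
    (ks : List String) (h : c ∉ s) :
    List.foldl (stepA p) (m, s) (ks.map (fun k => (k, c))) =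
      if ks.any p then (m ++ [c], s ++ [c]) else (m, s) := by
  induction ks with
  | nil => rfl
  | cons k ks ih =>
    by_cases hp : p k = true
    · have hadd : PySem.Set.add s c = s ++ [c] := by
        simp [PySem.Set.add, h]
      have hc : c ∈ s ++ [c] := by simp
      simp [stepA, hp, h, block_seen p (m ++ [c]) (s ++ [c]) c ks hc]
    · simp at hp
      simp [stepA, hp, ih]

theorem fold_blocks (p : String → Bool) (blocks : List (String × List String))
    (m : List String) (s : PySem.Set String)
    (hs : ∀ c ∈ blocks.map Prod.fst, c ∉ s)
    (hnd : (blocks.map Prod.fst).Nodup) :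
    List.foldl (stepA p) (m, s) (blocks.flatMap (fun b => b.2.map (fun k => (k, b.1)))) =
      (m ++ blocks.filterMap (fun b => if b.2.any p then some b.1 else none),
       s ++ blocks.filterMap (fun b => if b.2.any p then some b.1 else none)) := by
  induction blocks generalizing m s with
  | nil => simp
  | cons b bs ih =>
    have hcb : b.1 ∉ s := hs b.1 (by simp)
    have hnd' : (bs.map Prod.fst).Nodup := (List.nodup_cons.mp hnd).2
    have hb1 : b.1 ∉ bs.map Prod.fst := (List.nodup_cons.mp hnd).1
    have hstail : ∀ c ∈ bs.map Prod.fst, c ∉ s := fun c hc => hs c (by simp [hc])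
    rw [List.flatMap_cons, List.foldl_append, block_new p m s b.1 b.2 hcb]
    rcases hany : b.2.any p with _ | _
    · have hany' : ¬ ∃ x ∈ b.2, p x = true := by
        rw [← List.any_eq_true]; simp [hany]
      rw [if_neg (by simp), ih m s hstail hnd']
      simp [hany']
    · have hany' := hany
      simp only [List.any_eq_true] at hany'
      have hs' : ∀ c ∈ bs.map Prod.fst, c ∉ s ++ [b.1] := by
        intro c hc
        have hne : c ≠ b.1 := fun h => hb1 (h ▸ hc)
        simp [hstail c hc, hne]
      rw [if_pos (by simp), ih (m ++ [b.1]) (s ++ [b.1]) hs' hnd']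
      simp [hany']

theorem matched_eq (combined : String) :
    (CATEGORY_MAP.foldl
      (fun (st : List String × PySem.Set String) kv =>
        if PySem.Str.isIn kv.1 combined && !(PySem.Set.contains st.2 kv.2)
        then (st.1 ++ [kv.2], PySem.Set.add st.2 kv.2)
        else st)
      ([], PySem.Set.empty)).1 =
    SITE_CATEGORY_KEYS.filterMap
      (fun b => if ((PySem.Str.split? b.2 "|").getD []).any
                    (fun k => PySem.Str.isIn k combined)
                then some b.1 else none) := by
  have h := fold_blocks (fun k => PySem.Str.isIn k combined) BLOCKS [] PySem.Set.empty
    (by intro c _ hc; simp [PySem.Set.empty] at hc) (by decide)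
  conv_lhs => rw [map_flatMap]
  show (List.foldl (stepA (fun k => PySem.Str.isIn k combined)) ([], PySem.Set.empty)
    (BLOCKS.flatMap (fun b => b.2.map (fun k => (k, b.1))))).1 = _
  rw [h, ← split_SITE_CATEGORY_KEYS, List.filterMap_map]
  simp [Function.comp]

-- ===== VERDICT (by name: the statement is the Claim_ definition above) =====
theorem map_categories_spec : Claim_equal_map_categories := by
  intro gcs _
  unfold Spec_map_categories map_categories map_categories_alt
  by_cases h : gcs = []
  · simp [h]
  · simp only [h, if_false]
    rw [matched_eq]
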